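-- pv_equiv track=rewrite | github.com/MdArafatRahmandhrubo/Cse423-ship-attack-game | Ship Attack.py | circle_8zone
-- ===== SOURCE A (Python) =====
-- def circle_8zone(a,x,y):
--
--     i=0
--     p=[]
--
--     while i<=len(a)-1:
--         p.append(a[i] + x)
--         p.append(a[i+1] + y)
--         #zone0
--         p.append(a[i+1]+x)
--         p.append(a[i]+y)
--         #zone 2
--         p.append(a[i]*-1+x)
--         p.append(a[i+1]+y)
--         #zone3
--         p.append(a[i + 1]*-1+x)
--         p.append(a[i]+y)
--         #zone4
--         p.append(a[i + 1]*-1+x)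
--         p.append(a[i]*-1+y)
--         #zone 5
--         p.append(a[i]*-1+x)
--         p.append(a[i+1]*-1+y)
--         #zone 6
--         p.append(a[i]+x)
--         p.append(a[i+1]*-1+y)
--         #zone7
--         p.append(a[i + 1]+x)
--         p.append(a[i]*-1+y)
--         i += 2
--
--     return p
-- ===== SOURCE B (Python) =====
-- # Staged passes: fold into pairs, expand to two offset streams via reverse/negate,
-- # then interleave the shifted streams — instead of one indexed loop with 16 appends.
-- def circle_8zone(a, x, y):
--     # pass 1: fold the flat list into consecutive pairs
--     pairs, buf = [], None
--     for z in a: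
--         if buf is None:
--             buf = z
--         else:
--             pairs.append((buf, z))
--             buf = None
--     # pass 2: build the x- and y-offset streams of all 8-zone points
--     PX, PY = [], []
--     for u, v in pairs:
--         w, r, nw, nr = [u, v], [v, u], [-u, -v], [-v, -u]
--         PX += w + nw + nr + w
--         PY += r + r + nw + nr
--     # pass 3: interleave the two streams, shifted by the centre
--     out = []
--     for dx, dy in zip(PX, PY):
--         out.append(dx + x)
--         out.append(dy + y)
--     return out
-- ===== Notes on version B (the rewrite author's own statement) =====
-- stated objective: alternative
-- what changed: B recurses structurally on coordinate pairs and builds each 8-point block by zipping two offset streams derived from [u,v] via reverse/negate list operations, instead of A's index-while loop with 16 unrolled appends.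
import Mathlib
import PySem

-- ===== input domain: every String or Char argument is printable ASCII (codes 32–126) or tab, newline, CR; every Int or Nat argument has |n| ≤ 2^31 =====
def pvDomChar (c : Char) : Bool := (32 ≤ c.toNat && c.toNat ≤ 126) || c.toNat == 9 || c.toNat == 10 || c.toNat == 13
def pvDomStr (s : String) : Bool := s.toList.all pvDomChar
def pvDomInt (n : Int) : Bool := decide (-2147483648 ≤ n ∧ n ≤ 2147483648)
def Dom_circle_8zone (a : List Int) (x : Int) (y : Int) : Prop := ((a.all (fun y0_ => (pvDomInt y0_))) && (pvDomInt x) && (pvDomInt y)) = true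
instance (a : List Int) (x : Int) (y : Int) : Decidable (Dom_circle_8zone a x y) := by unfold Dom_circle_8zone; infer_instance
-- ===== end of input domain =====

-- B works in three staged passes — fold into pairs, expand to two offset streams by
-- reverse/negate, interleave the shifted streams — instead of A's indexed while loop
-- with 16 unrolled appends (objective: alternative).

-- ===== PORT A =====
-- while i <= len(a)-1: sixteen hand-written appends, then i += 2.
-- a[i], a[i+1] via pyGetD: in range under Pre_ (even length); outside Pre_ Python raises and nothing is claimed.
def circleLoopA (a : List Int) (x : Int) (y : Int) (i : Nat) (p : List Int) : List Int :=
  if _h : i + 1 ≤ a.length then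
    let u := PySem.List.pyGetD a (Int.ofNat i) 0
    let v := PySem.List.pyGetD a (Int.ofNat i + 1) 0
    circleLoopA a x y (i + 2)
      (p ++ [u + x, v + y, v + x, u + y, u * (-1) + x, v + y, v * (-1) + x, u + y,
             v * (-1) + x, u * (-1) + y, u * (-1) + x, v * (-1) + y, u + x, v * (-1) + y,
             v + x, u * (-1) + y])
  else p
termination_by a.length - i

def circle_8zone (a : List Int) (x : Int) (y : Int) : List Int :=
  circleLoopA a x y 0 []

-- ===== PORT B =====
-- pass 1's loop body: buf is None → remember z; else emit the pair (buf, z).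
def pairStep (s : List (Int × Int) × Option Int) (z : Int) : List (Int × Int) × Option Int :=
  match s.2 with
  | none => (s.1, some z)
  | some b => (s.1 ++ [(b, z)], none)

-- pass 1: fold into pairs; pass 2: the two offset streams (w,r,nw,nr segments);
-- pass 3: interleave the streams shifted by the centre.
def circle_8zone_alt (a : List Int) (x : Int) (y : Int) : List Int :=
  let pairs := (a.foldl pairStep ([], none)).1
  let px := pairs.foldl (fun s c =>
    s ++ ([c.1, c.2] ++ [-c.1, -c.2] ++ [-c.2, -c.1] ++ [c.1, c.2])) []
  let py := pairs.foldl (fun s c =>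
    s ++ ([c.2, c.1] ++ [c.2, c.1] ++ [-c.1, -c.2] ++ [-c.2, -c.1])) []
  (px.zip py).foldl (fun out c => out ++ [c.1 + x, c.2 + y]) []

-- ===== PRECONDITION & SPEC =====
-- Pre_: a has even length; on odd-length a Python A raises IndexError at a[i+1] of the last element.
def Pre_circle_8zone (a : List Int) (x : Int) (y : Int) : Prop := a.length % 2 = 0
instance (a : List Int) (x : Int) (y : Int) : Decidable (Pre_circle_8zone a x y) := by
  unfold Pre_circle_8zone; infer_instance

def pvWitness_circle_8zone : List Int × Int × Int := ([3, 4, 0, 5], 10, 20)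

def Spec_circle_8zone (a : List Int) (x : Int) (y : Int) (out : List Int) : Prop := out = circle_8zone_alt a x y
instance (a : List Int) (x : Int) (y : Int) (out : List Int) : Decidable (Spec_circle_8zone a x y out) := by unfold Spec_circle_8zone; infer_instance

-- ===== CLAIM =====
def Claim_equal_circle_8zone : Prop := ∀ (a : List Int) (x : Int) (y : Int), Dom_circle_8zone a x y → Pre_circle_8zone a x y → Spec_circle_8zone a x y (circle_8zone a x y)

-- ===== LEMMAS AND PROOFS =====

-- the x- and y-offset segments one pair contributes in pass 2
def segX (c : Int × Int) : List Int := [c.1, c.2] ++ [-c.1, -c.2] ++ [-c.2, -c.1] ++ [c.1, c.2]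
def segY (c : Int × Int) : List Int := [c.2, c.1] ++ [c.2, c.1] ++ [-c.1, -c.2] ++ [-c.2, -c.1]

-- the 16 output values one pair contributes (A's literal forms)
def big16 (x y : Int) (c : Int × Int) : List Int :=
  [c.1 + x, c.2 + y, c.2 + x, c.1 + y, c.1 * (-1) + x, c.2 + y, c.2 * (-1) + x, c.1 + y,
   c.2 * (-1) + x, c.1 * (-1) + y, c.1 * (-1) + x, c.2 * (-1) + y, c.1 + x, c.2 * (-1) + y,
   c.2 + x, c.1 * (-1) + y]

-- pass 1's fold: the accumulated pair list factors out
lemma pairStep_fold_fst (l : List Int) :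
    ∀ (acc : List (Int × Int)) (b? : Option Int),
      (l.foldl pairStep (acc, b?)).1 = acc ++ (l.foldl pairStep ([], b?)).1 := by
  induction l with
  | nil => intro acc b?; simp
  | cons z l ih =>
    intro acc b?
    cases b? with
    | none => simp only [List.foldl_cons, pairStep]; exact ih acc (some z)
    | some b =>
      simp only [List.foldl_cons, pairStep, List.nil_append]
      rw [ih (acc ++ [(b, z)]) none, ih [(b, z)] none]
      simp

lemma pairs_cons (u v : Int) (l : List Int) :
    ((u :: v :: l).foldl pairStep ([], none)).1
      = (u, v) :: (l.foldl pairStep ([], none)).1 := by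
  simp only [List.foldl_cons, pairStep, List.nil_append]
  rw [pairStep_fold_fst l [(u, v)] none]
  simp

-- passes 2+3 on an explicit pair list: interleaving the two streams gives the 16-blocks
lemma zip_streams_flat (x y : Int) (ps : List (Int × Int)) :
    (((ps.flatMap segX).zip (ps.flatMap segY)).foldl
        (fun out c => out ++ [c.1 + x, c.2 + y]) [])
      = ps.flatMap (big16 x y) := by
  induction ps with
  | nil => simp
  | cons c ps ih =>
    rw [List.flatMap_cons, List.flatMap_cons,
      List.zip_append (by simp [segX, segY]), List.foldl_append,
      PySem.List.foldl_append_eq_flatMap, PySem.List.foldl_append_eq_flatMap] at *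
    simp only [List.nil_append] at ih ⊢
    rw [ih, List.flatMap_cons]
    cases c with
    | mk u v => simp [segX, segY, big16]

-- B, rewritten through the pair list of pass 1
lemma alt_eq_flatMap (a : List Int) (x y : Int) :
    circle_8zone_alt a x y
      = ((a.foldl pairStep ([], none)).1).flatMap (big16 x y) := by
  unfold circle_8zone_alt
  rw [show (fun (s : List Int) (c : Int × Int) =>
        s ++ ([c.1, c.2] ++ [-c.1, -c.2] ++ [-c.2, -c.1] ++ [c.1, c.2]))
      = (fun s c => s ++ segX c) from rfl,
    show (fun (s : List Int) (c : Int × Int) =>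
        s ++ ([c.2, c.1] ++ [c.2, c.1] ++ [-c.1, -c.2] ++ [-c.2, -c.1]))
      = (fun s c => s ++ segY c) from rfl,
    PySem.List.foldl_append_eq_flatMap, PySem.List.foldl_append_eq_flatMap]
  simpa using zip_streams_flat x y (a.foldl pairStep ([], none)).1

-- A's loop from index i appends exactly the 16-blocks of the remaining pairs, for even remainder
lemma circleLoopA_eq_blocks (a : List Int) (x y : Int) :
    ∀ (n i : Nat) (p : List Int), a.length - i = n → (a.length - i) % 2 = 0 →
      circleLoopA a x y i p
        = p ++ (((a.drop i).foldl pairStep ([], none)).1).flatMap (big16 x y) := by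
  intro n
  induction n using Nat.strong_induction_on with
  | _ n ih =>
    intro i p hn hpar
    rw [circleLoopA]
    by_cases h : i + 1 ≤ a.length
    · rw [dif_pos h]
      have h2 : i + 2 ≤ a.length := by omega
      have hd : a.drop i = a[i] :: a[i + 1] :: a.drop (i + 2) := by
        rw [List.drop_eq_getElem_cons (by omega), List.drop_eq_getElem_cons (by omega)]
        norm_num
      have hu : PySem.List.pyGetD a (Int.ofNat i) 0 = a[i] := by
        simp [Int.ofNat_eq_natCast, PySem.List.pyGetD_natCast,
          List.getElem?_eq_getElem (by omega : i < a.length)]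
        rfl
      have hv : PySem.List.pyGetD a (Int.ofNat i + 1) 0 = a[i + 1] := by
        have hc : (Int.ofNat i) + 1 = ((i + 1 : Nat) : Int) := by simp
        rw [hc, PySem.List.pyGetD_natCast]
        simp [List.getElem?_eq_getElem (by omega : i + 1 < a.length)]
        rfl
      rw [ih (a.length - (i + 2)) (by omega) (i + 2) _ rfl (by omega)]
      rw [hd, pairs_cons, List.flatMap_cons]
      simp only [hu, hv, big16, List.append_assoc]
    · rw [dif_neg h]
      have hlen : (a.drop i).length ≤ 1 := by simp; omega
      rcases hdd : a.drop i with _ | ⟨z, _ | ⟨w, t⟩⟩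
      · simp
      · simp [pairStep]
      · rw [hdd] at hlen; simp at hlen

-- ===== VERDICT =====
theorem circle_8zone_spec : Claim_equal_circle_8zone := by
  intro a x y _ hpre
  have hp : a.length % 2 = 0 := hpre
  unfold Spec_circle_8zone circle_8zone
  rw [alt_eq_flatMap]
  have h := circleLoopA_eq_blocks a x y a.length 0 [] (by omega) (by omega)
  simpa using h
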